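-- pv_equiv track=rewrite | github.com/Thirace446/Society-Sunlit-Valley-Chinese-Localization | tools/comparison_en.py | compare_en_us_keys
-- ===== SOURCE A (Python) =====
-- def compare_en_us_keys(data_v, data_c):
--     """
--     Compares two JSON dictionaries.
--     Returns: (detailed_report_dict, has_differences_bool, list_of_diff_keys)
--     """
--     all_keys = sorted(set(data_v.keys()) | set(data_c.keys()))
--     full_report = {}
--     diff_keys = []
--
--     for key in all_keys:
--         val_v = data_v.get(key)
--         val_c = data_c.get(key)
--
--         if key in data_v and key in data_c:
--             if val_v == val_c:
--                 status = "Identical"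
--             else:
--                 status = "Value Mismatch"
--                 diff_keys.append(key)
--         elif key in data_v:
--             status = "Unique to Valley"
--             diff_keys.append(key)
--         else:
--             status = "Unique to Cobblemon"
--             diff_keys.append(key)
--
--         full_report[key] = {
--             "status": status,
--             "valley_value": val_v,
--             "cobblemon_value": val_c
--         }
--
--     return full_report, len(diff_keys) > 0, diff_keys
-- ===== SOURCE B (Python) =====
-- def compare_en_us_keys(data_v, data_c):
--     """Merge-join: sort each dict's items by key separately, then walk both
--     sorted lists with two pointers (like the merge step of mergesort).  A key
--     present on only one side is detected by the head comparison alone -- no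
--     key-union set, no membership tests, no dict lookups inside the loop."""
--     iv = sorted(data_v.items(), key=lambda p: p[0])
--     ic = sorted(data_c.items(), key=lambda p: p[0])
--     full_report = {}
--     diff_keys = []
--     i = j = 0
--     while i < len(iv) and j < len(ic):
--         kv, vv = iv[i]
--         kc, vc = ic[j]
--         if kv == kc:
--             if vv == vc:
--                 status = "Identical"
--             else:
--                 status = "Value Mismatch"
--                 diff_keys.append(kv)
--             full_report[kv] = {"status": status,
--                                "valley_value": vv, "cobblemon_value": vc}
--             i += 1
--             j += 1
--         elif kv < kc:
--             diff_keys.append(kv)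
--             full_report[kv] = {"status": "Unique to Valley",
--                                "valley_value": vv, "cobblemon_value": None}
--             i += 1
--         else:
--             diff_keys.append(kc)
--             full_report[kc] = {"status": "Unique to Cobblemon",
--                                "valley_value": None, "cobblemon_value": vc}
--             j += 1
--     while i < len(iv):
--         kv, vv = iv[i]
--         diff_keys.append(kv)
--         full_report[kv] = {"status": "Unique to Valley",
--                            "valley_value": vv, "cobblemon_value": None}
--         i += 1
--     while j < len(ic):
--         kc, vc = ic[j]
--         diff_keys.append(kc)
--         full_report[kc] = {"status": "Unique to Cobblemon",
--                            "valley_value": None, "cobblemon_value": vc}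
--         j += 1
--     return full_report, bool(diff_keys), diff_keys
-- ===== Notes on version B (the rewrite author's own statement) =====
-- stated objective: alternative
-- what changed: B is a merge-join: it sorts each dict's items by key separately and walks the two sorted lists with two pointers (the merge step of mergesort), classifying each key from the head comparison alone, instead of A's loop over the sorted union of key sets with per-key membership tests and dict lookups.
import Mathlib
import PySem

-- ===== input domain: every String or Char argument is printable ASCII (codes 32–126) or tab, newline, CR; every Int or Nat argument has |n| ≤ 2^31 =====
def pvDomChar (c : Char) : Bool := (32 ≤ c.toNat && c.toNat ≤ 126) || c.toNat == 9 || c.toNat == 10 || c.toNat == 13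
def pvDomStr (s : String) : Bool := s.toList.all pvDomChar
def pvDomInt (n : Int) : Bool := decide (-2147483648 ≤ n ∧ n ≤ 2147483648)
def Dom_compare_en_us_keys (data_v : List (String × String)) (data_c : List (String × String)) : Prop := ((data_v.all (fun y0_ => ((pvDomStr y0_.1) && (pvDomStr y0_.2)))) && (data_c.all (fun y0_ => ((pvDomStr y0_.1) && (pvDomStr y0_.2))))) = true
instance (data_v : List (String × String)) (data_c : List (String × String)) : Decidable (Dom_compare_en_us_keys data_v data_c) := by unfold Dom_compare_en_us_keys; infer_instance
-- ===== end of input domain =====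

-- B replaces A's loop over the sorted key-set union (with membership tests and dict
-- lookups) by a two-pointer merge-join of the two separately sorted item lists;
-- equivalence of the return values is proved.

-- ===== PORT A =====
def compare_en_us_keys (data_v : List (String × String)) (data_c : List (String × String)) : (List (String × List (String × Option String))) × Bool × List String :=
  let dv := PySem.Dict.ofList data_v
  let dc := PySem.Dict.ofList data_c
  let all_keys := PySem.List.sorted (PySem.Set.union (PySem.Set.ofList dv.keys) (PySem.Set.ofList dc.keys)) (fun k => k) false
  let st := all_keys.foldl (fun (acc : PySem.Dict String (List (String × Option String)) × List String) key =>
    let val_v := dv.get? key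
    let val_c := dc.get? key
    let sd : String × List String :=
      if dv.contains key && dc.contains key then
        (if val_v == val_c then ("Identical", acc.2) else ("Value Mismatch", acc.2 ++ [key]))
      else if dv.contains key then ("Unique to Valley", acc.2 ++ [key])
      else ("Unique to Cobblemon", acc.2 ++ [key])
    (acc.1.insert key [("status", some sd.1), ("valley_value", val_v), ("cobblemon_value", val_c)], sd.2))
    (PySem.Dict.empty, [])
  (st.1.items, decide ((st.2.length : Int) > 0), st.2)

-- ===== PORT B =====
-- The two-pointer while loops of Source B: structural recursion on the two sorted item
-- lists (the pair of indices advancing is the pair of lists shrinking).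
def pvMergeB (iv : List (String × String)) (ic : List (String × String))
    (rep : PySem.Dict String (List (String × Option String))) (diff : List String) :
    PySem.Dict String (List (String × Option String)) × List String :=
  match iv, ic with
  | [], [] => (rep, diff)
  | [], (kc, vc) :: tc =>
      pvMergeB [] tc
        (rep.insert kc [("status", some "Unique to Cobblemon"), ("valley_value", none), ("cobblemon_value", some vc)])
        (diff ++ [kc])
  | (kv, vv) :: tv, [] =>
      pvMergeB tv []
        (rep.insert kv [("status", some "Unique to Valley"), ("valley_value", some vv), ("cobblemon_value", none)])
        (diff ++ [kv])
  | (kv, vv) :: tv, (kc, vc) :: tc =>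
      if kv == kc then
        let sd : String × List String :=
          if vv == vc then ("Identical", diff) else ("Value Mismatch", diff ++ [kv])
        pvMergeB tv tc
          (rep.insert kv [("status", some sd.1), ("valley_value", some vv), ("cobblemon_value", some vc)])
          sd.2
      else if kv < kc then
        pvMergeB tv ((kc, vc) :: tc)
          (rep.insert kv [("status", some "Unique to Valley"), ("valley_value", some vv), ("cobblemon_value", none)])
          (diff ++ [kv])
      else
        pvMergeB ((kv, vv) :: tv) tc
          (rep.insert kc [("status", some "Unique to Cobblemon"), ("valley_value", none), ("cobblemon_value", some vc)])
          (diff ++ [kc])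
  termination_by iv.length + ic.length

def compare_en_us_keys_alt (data_v : List (String × String)) (data_c : List (String × String)) : (List (String × List (String × Option String))) × Bool × List String :=
  let dv := PySem.Dict.ofList data_v
  let dc := PySem.Dict.ofList data_c
  let iv := PySem.List.sorted dv.items (fun p => p.1) false
  let ic := PySem.List.sorted dc.items (fun p => p.1) false
  let st := pvMergeB iv ic PySem.Dict.empty []
  (st.1.items, !st.2.isEmpty, st.2)

-- ===== PRECONDITION & SPEC =====
def Spec_compare_en_us_keys (data_v : List (String × String)) (data_c : List (String × String)) (out : (List (String × List (String × Option String))) × Bool × List String) : Prop := out = compare_en_us_keys_alt data_v data_c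
instance (data_v : List (String × String)) (data_c : List (String × String)) (out : (List (String × List (String × Option String))) × Bool × List String) : Decidable (Spec_compare_en_us_keys data_v data_c out) := by unfold Spec_compare_en_us_keys; infer_instance

-- ===== CLAIM (what is proved, stated in full; the proofs are below) =====
def Claim_equal_compare_en_us_keys : Prop := ∀ (data_v : List (String × String)) (data_c : List (String × String)), Dom_compare_en_us_keys data_v data_c → Spec_compare_en_us_keys data_v data_c (compare_en_us_keys data_v data_c)

-- ===== LEMMAS AND PROOFS =====

-- A's per-key report entry and its diff-key test, factored out of A's loop body.
def pvEntry (dv dc : PySem.Dict String String) (k : String) : List (String × Option String) :=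
  [("status", some (if dv.contains k && dc.contains k then
        (if dv.get? k == dc.get? k then "Identical" else "Value Mismatch")
      else if dv.contains k then "Unique to Valley" else "Unique to Cobblemon")),
   ("valley_value", dv.get? k), ("cobblemon_value", dc.get? k)]

def pvP (dv dc : PySem.Dict String String) (k : String) : Bool :=
  !(dv.contains k && dc.contains k && (dv.get? k == dc.get? k))

-- the key sequence the merge-join visits
def pvMKeys : List (String × String) → List (String × String) → List String
  | [], ic => ic.map (·.1)
  | iv, [] => iv.map (·.1)
  | (kv, vv) :: tv, (kc, vc) :: tc =>
      if kv == kc then kv :: pvMKeys tv tc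
      else if kv < kc then kv :: pvMKeys tv ((kc, vc) :: tc)
      else kc :: pvMKeys ((kv, vv) :: tv) tc
  termination_by iv ic => iv.length + ic.length

theorem pv_mem_mkeys (iv ic : List (String × String)) (k : String) :
    k ∈ pvMKeys iv ic ↔ k ∈ iv.map (·.1) ∨ k ∈ ic.map (·.1) := by
  fun_induction pvMKeys iv ic with
  | case1 ic => simp
  | case2 => simp
  | case3 kv vv tv kc vc tc heq ih =>
      rw [pvMKeys.eq_def]; rw [← pvMKeys.eq_def]
      have : kv = kc := by simpa using heq
      subst this
      simp [ih]
      tauto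
  | case4 kv vv tv kc vc tc heq hlt ih =>
      rw [pvMKeys.eq_def]; rw [← pvMKeys.eq_def]
      simp [ih]
      tauto
  | case5 kv vv tv kc vc tc heq hlt ih =>
      rw [pvMKeys.eq_def]; rw [← pvMKeys.eq_def]
      simp [ih]
      tauto

theorem pv_mkeys_pairwise (iv ic : List (String × String))
    (hiv : iv.Pairwise (fun a b => a.1 < b.1)) (hic : ic.Pairwise (fun a b => a.1 < b.1)) :
    (pvMKeys iv ic).Pairwise (· < ·) := by
  fun_induction pvMKeys iv ic with
  | case1 ic => simpa [List.pairwise_map] using hic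
  | case2 => simpa [List.pairwise_map] using hiv
  | case3 kv vv tv kc vc tc heq ih =>
      rw [pvMKeys.eq_def]; rw [← pvMKeys.eq_def]
      have hkv : kv = kc := by simpa using heq
      rw [List.pairwise_cons] at hiv hic ⊢
      refine ⟨?_, ih hiv.2 hic.2 ⟩
      intro b hb
      rcases (pv_mem_mkeys tv tc b).mp hb with h | h
      · obtain ⟨p, hp, hpb⟩ := List.mem_map.mp h
        exact hpb ▸ hiv.1 p hp
      · obtain ⟨p, hp, hpb⟩ := List.mem_map.mp h
        exact hkv ▸ hpb ▸ hic.1 p hp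
  | case4 kv vv tv kc vc tc heq hlt ih =>
      rw [pvMKeys.eq_def]; rw [← pvMKeys.eq_def]
      rw [List.pairwise_cons] at hiv ⊢
      refine ⟨?_, ih hiv.2 hic⟩
      intro b hb
      rcases (pv_mem_mkeys tv ((kc, vc) :: tc) b).mp hb with h | h
      · obtain ⟨p, hp, hpb⟩ := List.mem_map.mp h
        exact hpb ▸ hiv.1 p hp
      · simp only [List.map_cons, List.mem_cons] at h
        rcases h with h | h
        · exact h ▸ hlt
        · obtain ⟨p, hp, hpb⟩ := List.mem_map.mp h
          rw [List.pairwise_cons] at hic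
          exact lt_trans hlt (hpb ▸ hic.1 p hp)
  | case5 kv vv tv kc vc tc heq hlt ih =>
      rw [pvMKeys.eq_def]; rw [← pvMKeys.eq_def]
      have hck : kc < kv := by
        rcases lt_trichotomy kv kc with h | h | h
        · exact absurd h hlt
        · exact absurd (by simpa using h) heq
        · exact h
      rw [List.pairwise_cons] at hic ⊢
      refine ⟨?_, ih hiv hic.2⟩
      intro b hb
      rcases (pv_mem_mkeys ((kv, vv) :: tv) tc b).mp hb with h | h
      · simp only [List.map_cons, List.mem_cons] at h
        rcases h with h | h
        · exact h ▸ hck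
        · obtain ⟨p, hp, hpb⟩ := List.mem_map.mp h
          rw [List.pairwise_cons] at hiv
          exact lt_trans hck (hpb ▸ hiv.1 p hp)
      · obtain ⟨p, hp, hpb⟩ := List.mem_map.mp h
        exact hpb ▸ hic.1 p hp

theorem pvMKeys_nil_left (ic : List (String × String)) :
    pvMKeys [] ic = ic.map (·.1) := by
  rw [pvMKeys.eq_def]

theorem pvMKeys_cons_nil (p : String × String) (tv : List (String × String)) :
    pvMKeys (p :: tv) [] = (p :: tv).map (·.1) := by
  rw [pvMKeys.eq_def]

theorem pvMKeys_nil_right (iv : List (String × String)) :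
    pvMKeys iv [] = iv.map (·.1) := by
  cases iv with
  | nil => rw [pvMKeys.eq_def]
  | cons p t => rw [pvMKeys.eq_def]

theorem pvMKeys_cons_eq (kv vv kc vc : String) (tv tc : List (String × String)) (h : (kv == kc) = true) :
    pvMKeys ((kv, vv) :: tv) ((kc, vc) :: tc) = kv :: pvMKeys tv tc := by
  rw [pvMKeys.eq_def]; simp only [h, if_true]

theorem pvMKeys_cons_lt (kv vv kc vc : String) (tv tc : List (String × String))
    (h : (kv == kc) ≠ true) (hlt : kv < kc) :
    pvMKeys ((kv, vv) :: tv) ((kc, vc) :: tc) = kv :: pvMKeys tv ((kc, vc) :: tc) := by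
  rw [pvMKeys.eq_def]; simp only [h, if_false, hlt, if_true, Bool.false_eq_true]

theorem pvMKeys_cons_gt (kv vv kc vc : String) (tv tc : List (String × String))
    (h : (kv == kc) ≠ true) (hlt : ¬ kv < kc) :
    pvMKeys ((kv, vv) :: tv) ((kc, vc) :: tc) = kc :: pvMKeys ((kv, vv) :: tv) tc := by
  rw [pvMKeys.eq_def]; simp only [h, hlt, if_false, Bool.false_eq_true]

-- A's loop, split into its report fold and its diff fold.
theorem pv_loopA (dv dc : PySem.Dict String String) (ks : List String)
    (d : PySem.Dict String (List (String × Option String))) (l : List String) :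
    ks.foldl (fun acc key =>
      let val_v := dv.get? key
      let val_c := dc.get? key
      let sd : String × List String :=
        if dv.contains key && dc.contains key then
          (if val_v == val_c then ("Identical", acc.2) else ("Value Mismatch", acc.2 ++ [key]))
        else if dv.contains key then ("Unique to Valley", acc.2 ++ [key])
        else ("Unique to Cobblemon", acc.2 ++ [key])
      (acc.1.insert key [("status", some sd.1), ("valley_value", val_v), ("cobblemon_value", val_c)], sd.2)) (d, l)
    = (ks.foldl (fun d k => d.insert k (pvEntry dv dc k)) d,
       ks.foldl (fun l k => if pvP dv dc k then l ++ [k] else l) l) := by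
  induction ks generalizing d l with
  | nil => rfl
  | cons k t ih =>
      simp only [List.foldl_cons]
      rw [ih]
      congr 1
      · congr 1
        unfold pvEntry
        split_ifs <;> simp_all
      · unfold pvP
        split_ifs <;> simp_all

-- B's merge-join, characterised as A's two folds over the merged key sequence.
theorem pv_loopB (dv dc : PySem.Dict String String) (iv ic : List (String × String))
    (hiv : iv.Pairwise (fun a b => a.1 < b.1)) (hic : ic.Pairwise (fun a b => a.1 < b.1))
    (Hv1 : ∀ k, k ∈ iv.map (·.1) ∨ k ∈ ic.map (·.1) → dv.contains k = decide (k ∈ iv.map (·.1)))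
    (Hc1 : ∀ k, k ∈ iv.map (·.1) ∨ k ∈ ic.map (·.1) → dc.contains k = decide (k ∈ ic.map (·.1)))
    (Hv2 : ∀ p ∈ iv, dv.get? p.1 = some p.2) (Hc2 : ∀ p ∈ ic, dc.get? p.1 = some p.2)
    (rep : PySem.Dict String (List (String × Option String))) (diff : List String) :
    pvMergeB iv ic rep diff
    = ((pvMKeys iv ic).foldl (fun d k => d.insert k (pvEntry dv dc k)) rep,
       diff ++ (pvMKeys iv ic).filter (pvP dv dc)) := by
  revert hiv hic Hv1 Hc1 Hv2 Hc2
  fun_induction pvMergeB iv ic rep diff with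
  | case1 rep diff =>
      intro _ _ _ _ _ _
      simp [pvMKeys]
  | case2 rep diff kc vc tc ih =>
      intro hiv hic Hv1 Hc1 Hv2 Hc2
      have hgtc : ∀ k, k ∈ List.map (fun x => x.1) tc → kc < k := by
        intro k hk
        obtain ⟨p, hp, rfl⟩ := List.mem_map.mp hk
        exact (List.pairwise_cons.mp hic).1 p hp
      have hmem : kc ∈ List.map (fun x => x.1) ((kc, vc) :: tc) := by simp
      have h1 : dv.contains kc = false := by simpa using Hv1 kc (Or.inr hmem)
      have h2 : dc.contains kc = true := by simpa using Hc1 kc (Or.inr hmem)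
      have h3 : dv.get? kc = none := (PySem.Dict.get?_eq_none_iff_contains dv kc).mpr h1
      have h4 : dc.get? kc = some vc := Hc2 (kc, vc) (by simp)
      have hEntry : pvEntry dv dc kc = [("status", some "Unique to Cobblemon"), ("valley_value", none), ("cobblemon_value", some vc)] := by
        simp [pvEntry, h1, h2, h3, h4]
      have hP : pvP dv dc kc = true := by simp [pvP, h1]
      have hrec := ih List.Pairwise.nil (List.pairwise_cons.mp hic).2
        (by intro k hk
            rcases hk with h | h
            · simp at h
            · exact Hv1 k (Or.inr (by rw [List.map_cons]; exact List.mem_cons_of_mem _ h)))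
        (by intro k hk
            rcases hk with h | h
            · simp at h
            · have hne : k ≠ kc := ne_of_gt (hgtc k h)
              have := Hc1 k (Or.inr (by rw [List.map_cons]; exact List.mem_cons_of_mem _ h))
              rw [this]; exact decide_eq_decide.mpr (by simp [List.map_cons, List.mem_cons, hne]))
        (by simp) (fun p hp => Hc2 p (List.mem_cons_of_mem _ hp))
      rw [pvMKeys_nil_left]
      simp only [List.map_cons]
      rw [← pvMKeys_nil_left, List.foldl_cons, hEntry, List.filter_cons_of_pos hP,
        List.append_cons diff kc (List.filter (pvP dv dc) (pvMKeys [] tc))]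
      exact hrec
  | case3 rep diff kv vv tv ih =>
      intro hiv hic Hv1 Hc1 Hv2 Hc2
      have hgtv : ∀ k, k ∈ List.map (fun x => x.1) tv → kv < k := by
        intro k hk
        obtain ⟨p, hp, rfl⟩ := List.mem_map.mp hk
        exact (List.pairwise_cons.mp hiv).1 p hp
      have hmem : kv ∈ List.map (fun x => x.1) ((kv, vv) :: tv) := by simp
      have h1 : dv.contains kv = true := by simpa using Hv1 kv (Or.inl hmem)
      have h2 : dc.contains kv = false := by simpa using Hc1 kv (Or.inl hmem)
      have h3 : dv.get? kv = some vv := Hv2 (kv, vv) (by simp)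
      have h4 : dc.get? kv = none := (PySem.Dict.get?_eq_none_iff_contains dc kv).mpr h2
      have hEntry : pvEntry dv dc kv = [("status", some "Unique to Valley"), ("valley_value", some vv), ("cobblemon_value", none)] := by
        simp [pvEntry, h1, h2, h3, h4]
      have hP : pvP dv dc kv = true := by simp [pvP, h2]
      have hrec := ih (List.pairwise_cons.mp hiv).2 List.Pairwise.nil
        (by intro k hk
            rcases hk with h | h
            · have hne : k ≠ kv := ne_of_gt (hgtv k h)
              have := Hv1 k (Or.inl (by rw [List.map_cons]; exact List.mem_cons_of_mem _ h))
              rw [this]; exact decide_eq_decide.mpr (by simp [List.map_cons, List.mem_cons, hne])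
            · simp at h)
        (by intro k hk
            rcases hk with h | h
            · exact Hc1 k (Or.inl (by rw [List.map_cons]; exact List.mem_cons_of_mem _ h))
            · simp at h)
        (fun p hp => Hv2 p (List.mem_cons_of_mem _ hp)) (by simp)
      rw [pvMKeys_cons_nil]
      simp only [List.map_cons]
      rw [← pvMKeys_nil_right, List.foldl_cons, hEntry, List.filter_cons_of_pos hP,
        List.append_cons diff kv (List.filter (pvP dv dc) (pvMKeys tv []))]
      exact hrec
  | case4 rep diff kv vv tv kc vc tc heq sd ih =>
      intro hiv hic Hv1 Hc1 Hv2 Hc2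
      have hkc : kv = kc := by simpa using heq
      have hgtv : ∀ k, k ∈ List.map (fun x => x.1) tv → kv < k := by
        intro k hk
        obtain ⟨p, hp, rfl⟩ := List.mem_map.mp hk
        exact (List.pairwise_cons.mp hiv).1 p hp
      have hgtc : ∀ k, k ∈ List.map (fun x => x.1) tc → kv < k := by
        intro k hk
        obtain ⟨p, hp, rfl⟩ := List.mem_map.mp hk
        exact hkc ▸ (List.pairwise_cons.mp hic).1 p hp
      have hmemv : kv ∈ List.map (fun x => x.1) ((kv, vv) :: tv) := by simp
      have h1 : dv.contains kv = true := by simpa using Hv1 kv (Or.inl hmemv)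
      have h2 : dc.contains kv = true := by
        have := Hc1 kv (Or.inl hmemv)
        simpa [hkc] using this
      have h3 : dv.get? kv = some vv := Hv2 (kv, vv) (by simp)
      have h4 : dc.get? kv = some vc := by
        have := Hc2 (kc, vc) (by simp)
        rw [hkc]; exact this
      have hEntry : pvEntry dv dc kv = [("status", some (if (vv == vc) = true then "Identical" else "Value Mismatch")), ("valley_value", some vv), ("cobblemon_value", some vc)] := by
        simp only [pvEntry, h1, h2, h3, h4, Bool.and_self, if_true]
        simp
      have hP : pvP dv dc kv = !(vv == vc) := by simp [pvP, h1, h2, h3, h4]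
      have hHv1' : ∀ (k : String), k ∈ List.map (fun x => x.1) tv ∨ k ∈ List.map (fun x => x.1) tc → dv.contains k = decide (k ∈ List.map (fun x => x.1) tv) := by
        intro k hk
        have hne : k ≠ kv := by rcases hk with h | h <;> exact ne_of_gt (by first | exact hgtv k h | exact hgtc k h)
        have := Hv1 k (by rcases hk with h | h
                          · exact Or.inl (by rw [List.map_cons]; exact List.mem_cons_of_mem _ h)
                          · exact Or.inr (by rw [List.map_cons]; exact List.mem_cons_of_mem _ h))
        rw [this]; exact decide_eq_decide.mpr (by simp [List.map_cons, List.mem_cons, hne])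
      have hHc1' : ∀ (k : String), k ∈ List.map (fun x => x.1) tv ∨ k ∈ List.map (fun x => x.1) tc → dc.contains k = decide (k ∈ List.map (fun x => x.1) tc) := by
        intro k hk
        have hne : k ≠ kc := by
          rw [← hkc]
          rcases hk with h | h <;> exact ne_of_gt (by first | exact hgtv k h | exact hgtc k h)
        have := Hc1 k (by rcases hk with h | h
                          · exact Or.inl (by rw [List.map_cons]; exact List.mem_cons_of_mem _ h)
                          · exact Or.inr (by rw [List.map_cons]; exact List.mem_cons_of_mem _ h))
        rw [this]; exact decide_eq_decide.mpr (by simp [List.map_cons, List.mem_cons, hne])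
      have hrec := ih (List.pairwise_cons.mp hiv).2 (List.pairwise_cons.mp hic).2 hHv1' hHc1'
        (fun p hp => Hv2 p (List.mem_cons_of_mem _ hp)) (fun p hp => Hc2 p (List.mem_cons_of_mem _ hp))
      rw [pvMKeys_cons_eq _ _ _ _ _ _ heq, List.foldl_cons, hEntry]
      by_cases hvc : (vv == vc) = true
      · have hsd : sd = ("Identical", diff) := by simp [sd, hvc]
        rw [List.filter_cons_of_neg (by simp [hP, hvc])]
        rw [hsd] at hrec ⊢
        simpa [hvc] using hrec
      · have hsd : sd = ("Value Mismatch", diff ++ [kv]) := by simp [sd, hvc]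
        rw [List.filter_cons_of_pos (by simp [hP, hvc]), List.append_cons diff kv (List.filter (pvP dv dc) (pvMKeys tv tc))]
        rw [hsd] at hrec ⊢
        simpa [hvc] using hrec
  | case5 rep diff kv vv tv kc vc tc heq hlt ih =>
      intro hiv hic Hv1 Hc1 Hv2 Hc2
      have hgtv : ∀ k, k ∈ List.map (fun x => x.1) tv → kv < k := by
        intro k hk
        obtain ⟨p, hp, rfl⟩ := List.mem_map.mp hk
        exact (List.pairwise_cons.mp hiv).1 p hp
      have hgtc : ∀ k, k ∈ List.map (fun x => x.1) tc → kc < k := by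
        intro k hk
        obtain ⟨p, hp, rfl⟩ := List.mem_map.mp hk
        exact (List.pairwise_cons.mp hic).1 p hp
      have hmemv : kv ∈ List.map (fun x => x.1) ((kv, vv) :: tv) := by simp
      have hnotc : kv ∉ List.map (fun x => x.1) ((kc, vc) :: tc) := by
        simp only [List.map_cons, List.mem_cons]
        rintro (h | h)
        · exact absurd h (ne_of_lt hlt)
        · exact absurd rfl (ne_of_gt (lt_trans hlt (hgtc kv h)))
      have h1 : dv.contains kv = true := by simpa using Hv1 kv (Or.inl hmemv)
      have h2 : dc.contains kv = false := by
        have hne1 : kv ≠ kc := ne_of_lt hlt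
        have hne2 : kv ∉ List.map (fun x => x.1) tc := fun h => absurd rfl (ne_of_gt (lt_trans hlt (hgtc kv h)))
        have := Hc1 kv (Or.inl hmemv)
        rw [this]; simp [List.map_cons, List.mem_cons, hne1, hne2]
      have h3 : dv.get? kv = some vv := Hv2 (kv, vv) (by simp)
      have h4 : dc.get? kv = none := (PySem.Dict.get?_eq_none_iff_contains dc kv).mpr h2
      have hEntry : pvEntry dv dc kv = [("status", some "Unique to Valley"), ("valley_value", some vv), ("cobblemon_value", none)] := by
        simp [pvEntry, h1, h2, h3, h4]
      have hP : pvP dv dc kv = true := by simp [pvP, h2]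
      rw [pvMKeys_cons_lt _ _ _ _ _ _ heq hlt, List.foldl_cons, hEntry,
        List.filter_cons_of_pos hP, List.append_cons diff kv (List.filter (pvP dv dc) (pvMKeys tv ((kc, vc) :: tc)))]
      refine ih (List.pairwise_cons.mp hiv).2 hic ?_ ?_
        (fun p hp => Hv2 p (List.mem_cons_of_mem _ hp)) Hc2
      · intro k hk
        have hne : k ≠ kv := by
          rcases hk with h | h
          · exact ne_of_gt (hgtv k h)
          · simp only [List.map_cons, List.mem_cons] at h
            rcases h with h | h
            · exact h ▸ ne_of_gt hlt
            · exact ne_of_gt (lt_trans hlt (hgtc k h))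
        have := Hv1 k (by rcases hk with h | h
                          · exact Or.inl (by rw [List.map_cons]; exact List.mem_cons_of_mem _ h)
                          · exact Or.inr h)
        rw [this]; exact decide_eq_decide.mpr (by simp [List.map_cons, List.mem_cons, hne])
      · intro k hk
        exact Hc1 k (by rcases hk with h | h
                        · exact Or.inl (by rw [List.map_cons]; exact List.mem_cons_of_mem _ h)
                        · exact Or.inr h)
  | case6 rep diff kv vv tv kc vc tc heq hlt ih =>
      intro hiv hic Hv1 Hc1 Hv2 Hc2
      have hck : kc < kv := by
        rcases lt_trichotomy kv kc with h | h | h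
        · exact absurd h hlt
        · exact absurd (by simpa using h) heq
        · exact h
      have hgtv : ∀ k, k ∈ List.map (fun x => x.1) tv → kv < k := by
        intro k hk
        obtain ⟨p, hp, rfl⟩ := List.mem_map.mp hk
        exact (List.pairwise_cons.mp hiv).1 p hp
      have hgtc : ∀ k, k ∈ List.map (fun x => x.1) tc → kc < k := by
        intro k hk
        obtain ⟨p, hp, rfl⟩ := List.mem_map.mp hk
        exact (List.pairwise_cons.mp hic).1 p hp
      have hmemc : kc ∈ List.map (fun x => x.1) ((kc, vc) :: tc) := by simp
      have hnotv : kc ∉ List.map (fun x => x.1) ((kv, vv) :: tv) := by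
        simp only [List.map_cons, List.mem_cons]
        rintro (h | h)
        · exact absurd h (ne_of_lt hck)
        · exact absurd rfl (ne_of_gt (lt_trans hck (hgtv kc h)))
      have h1 : dv.contains kc = false := by
        have hne1 : kc ≠ kv := ne_of_lt hck
        have hne2 : kc ∉ List.map (fun x => x.1) tv := fun h => absurd rfl (ne_of_gt (lt_trans hck (hgtv kc h)))
        have := Hv1 kc (Or.inr hmemc)
        rw [this]; simp [List.map_cons, List.mem_cons, hne1, hne2]
      have h2 : dc.contains kc = true := by simpa using Hc1 kc (Or.inr hmemc)
      have h3 : dv.get? kc = none := (PySem.Dict.get?_eq_none_iff_contains dv kc).mpr h1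
      have h4 : dc.get? kc = some vc := Hc2 (kc, vc) (by simp)
      have hEntry : pvEntry dv dc kc = [("status", some "Unique to Cobblemon"), ("valley_value", none), ("cobblemon_value", some vc)] := by
        simp [pvEntry, h1, h2, h3, h4]
      have hP : pvP dv dc kc = true := by simp [pvP, h1]
      rw [pvMKeys_cons_gt _ _ _ _ _ _ heq hlt, List.foldl_cons, hEntry,
        List.filter_cons_of_pos hP, List.append_cons diff kc (List.filter (pvP dv dc) (pvMKeys ((kv, vv) :: tv) tc))]
      refine ih hiv (List.pairwise_cons.mp hic).2 ?_ ?_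
        Hv2 (fun p hp => Hc2 p (List.mem_cons_of_mem _ hp))
      · intro k hk
        exact Hv1 k (by rcases hk with h | h
                        · exact Or.inl h
                        · exact Or.inr (by rw [List.map_cons]; exact List.mem_cons_of_mem _ h))
      · intro k hk
        have hne : k ≠ kc := by
          rcases hk with h | h
          · simp only [List.map_cons, List.mem_cons] at h
            rcases h with h | h
            · exact h ▸ ne_of_gt hck
            · exact ne_of_gt (lt_trans hck (hgtv k h))
          · exact ne_of_gt (hgtc k h)
        have := Hc1 k (by rcases hk with h | h
                          · exact Or.inl h
                          · exact Or.inr (by rw [List.map_cons]; exact List.mem_cons_of_mem _ h))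
        rw [this]; exact decide_eq_decide.mpr (by simp [List.map_cons, List.mem_cons, hne])

theorem compare_en_us_keys_spec' (data_v data_c : List (String × String)) :
    compare_en_us_keys data_v data_c = compare_en_us_keys_alt data_v data_c := by
  simp only [compare_en_us_keys, compare_en_us_keys_alt]
  set dv := PySem.Dict.ofList data_v with hdv
  set dc := PySem.Dict.ofList data_c with hdc
  set sv := PySem.Set.ofList dv.keys with hsv
  set sc := PySem.Set.ofList dc.keys with hsc
  set iv := PySem.List.sorted dv.items (fun p => p.1) false with hiv_def
  set ic := PySem.List.sorted dc.items (fun p => p.1) false with hic_def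
  set allK := PySem.List.sorted (PySem.Set.union sv sc) (fun k => k) false with hallK
  have hndv : dv.keys.Nodup := PySem.Dict.nodup_keys_ofList data_v
  have hndc : dc.keys.Nodup := PySem.Dict.nodup_keys_ofList data_c
  have hpermv : (iv.map (fun p => p.1)).Perm dv.keys :=
    (PySem.List.sorted_perm dv.items (fun p => p.1) false).map _
  have hpermc : (ic.map (fun p => p.1)).Perm dc.keys :=
    (PySem.List.sorted_perm dc.items (fun p => p.1) false).map _
  have hiv : iv.Pairwise (fun a b => a.1 < b.1) := by
    have hle : iv.Pairwise (fun a b => a.1 ≤ b.1) :=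
      PySem.List.sorted_pairwise dv.items (fun p => p.1)
    have hne : iv.Pairwise (fun a b => a.1 ≠ b.1) :=
      List.pairwise_map.mp (hpermv.nodup_iff.mpr hndv)
    exact (hle.and hne).imp (fun h => lt_of_le_of_ne h.1 h.2)
  have hic : ic.Pairwise (fun a b => a.1 < b.1) := by
    have hle : ic.Pairwise (fun a b => a.1 ≤ b.1) :=
      PySem.List.sorted_pairwise dc.items (fun p => p.1)
    have hne : ic.Pairwise (fun a b => a.1 ≠ b.1) :=
      List.pairwise_map.mp (hpermc.nodup_iff.mpr hndc)
    exact (hle.and hne).imp (fun h => lt_of_le_of_ne h.1 h.2)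
  have Hv1 : ∀ k, k ∈ iv.map (fun x => x.1) ∨ k ∈ ic.map (fun x => x.1) →
      dv.contains k = decide (k ∈ iv.map (fun x => x.1)) := by
    intro k _
    rw [PySem.Dict.contains_eq_decide_mem_keys]
    exact decide_eq_decide.mpr hpermv.mem_iff.symm
  have Hc1 : ∀ k, k ∈ iv.map (fun x => x.1) ∨ k ∈ ic.map (fun x => x.1) →
      dc.contains k = decide (k ∈ ic.map (fun x => x.1)) := by
    intro k _
    rw [PySem.Dict.contains_eq_decide_mem_keys]
    exact decide_eq_decide.mpr hpermc.mem_iff.symm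
  have Hv2 : ∀ p ∈ iv, dv.get? p.1 = some p.2 := by
    rintro ⟨k, v⟩ hp
    have : (k, v) ∈ dv.items := (PySem.List.mem_sorted _ _ _ _).mp hp
    exact PySem.Dict.get?_of_mem_items dv this hndv
  have Hc2 : ∀ p ∈ ic, dc.get? p.1 = some p.2 := by
    rintro ⟨k, v⟩ hp
    have : (k, v) ∈ dc.items := (PySem.List.mem_sorted _ _ _ _).mp hp
    exact PySem.Dict.get?_of_mem_items dc this hndc
  have hpwK : (pvMKeys iv ic).Pairwise (· < ·) := pv_mkeys_pairwise iv ic hiv hic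
  have hndK : (pvMKeys iv ic).Nodup := hpwK.imp ne_of_lt
  have hndU : (PySem.Set.union sv sc).Nodup :=
    PySem.Set.nodup_union _ _ (PySem.Set.nodup_ofList _)
  have hperm : (pvMKeys iv ic).Perm (PySem.Set.union sv sc) := by
    rw [List.perm_ext_iff_of_nodup hndK hndU]
    intro k
    rw [pv_mem_mkeys, PySem.Set.mem_union, hsv, hsc, PySem.Set.mem_ofList, PySem.Set.mem_ofList,
      hpermv.mem_iff, hpermc.mem_iff]
  have hK : allK = pvMKeys iv ic :=
    PySem.List.sorted_eq_of_perm_of_pairwise_lt _ _ _ hperm hpwK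
  rw [pv_loopA, hK,
    pv_loopB dv dc iv ic hiv hic Hv1 Hc1 Hv2 Hc2 PySem.Dict.empty [],
    PySem.List.foldl_append_if_eq_filter]
  simp only [List.nil_append]
  refine congrArg₂ _ rfl (congrArg₂ _ ?_ rfl)
  rcases List.filter (pvP dv dc) (pvMKeys iv ic) with _ | ⟨a, t⟩ <;> simp

-- ===== VERDICT (by name: the statement is the Claim_ definition above) =====
theorem compare_en_us_keys_spec : Claim_equal_compare_en_us_keys := by
  intro data_v data_c _
  unfold Spec_compare_en_us_keys
  exact compare_en_us_keys_spec' data_v data_c
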